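-- pv_equiv track=rewrite | github.com/RUiN-jiarun/Information-Retrieval-System | BooleanQuery.py | handle_or
-- ===== SOURCE A (Python) =====
-- def handle_or(index1, index2):
--     index1.sort()
--     index2.sort()
--     i = 0
--     j = 0
--     result = []
--     while i < len(index1) and j < len(index2):
--         if index1[i] == index2[j]:
--             result.append(index1[i])
--             i += 1
--             j += 1
--         elif index1[i]<index2[j]:
--             result.append(index1[i])
--             i += 1
--         else:
--             result.append(index2[j])
--             j += 1
--     if i == len(index1):
--         while j < len(index2):
--             result.append(index2[j])
--             j += 1
--     else:
--         while i < len(index1):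
--             result.append(index1[i])
--             i += 1
--     return result
-- ===== SOURCE B (Python) =====
-- def handle_or(index1, index2):
--     # Count-table union instead of a two-pointer merge; keeps the in-place sorts of A.
--     index1.sort()
--     index2.sort()
--     c1 = {}
--     for x in index1:
--         c1[x] = c1.get(x, 0) + 1
--     c2 = {}
--     for x in index2:
--         c2[x] = c2.get(x, 0) + 1
--     result = []
--     for x in sorted(set(index1) | set(index2)):
--         result += [x] * max(c1.get(x, 0), c2.get(x, 0))
--     return result
-- ===== Notes on version B (the rewrite author's own statement) =====
-- stated objective: alternative
-- what changed: Replaces the two-pointer merge over the two sorted lists by a count-table union: build a count dict per list, take the per-key maximum, and emit each key of the sorted key-set that many times (the in-place sorts are kept for the side effect).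
import Mathlib
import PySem

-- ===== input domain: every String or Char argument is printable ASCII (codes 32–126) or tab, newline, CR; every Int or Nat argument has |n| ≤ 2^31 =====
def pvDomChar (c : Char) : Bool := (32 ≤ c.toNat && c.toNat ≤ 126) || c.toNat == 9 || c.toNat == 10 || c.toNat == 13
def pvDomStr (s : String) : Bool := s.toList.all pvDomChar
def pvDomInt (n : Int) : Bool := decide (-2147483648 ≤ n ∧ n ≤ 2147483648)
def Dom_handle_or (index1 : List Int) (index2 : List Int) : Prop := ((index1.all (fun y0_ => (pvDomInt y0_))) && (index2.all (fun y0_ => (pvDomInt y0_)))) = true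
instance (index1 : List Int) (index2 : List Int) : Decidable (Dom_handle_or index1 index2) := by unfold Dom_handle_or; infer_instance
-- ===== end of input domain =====

-- B replaces A's two-pointer merge of the two sorted lists by a count-table union
-- (per-element max of the two count dicts, emitted over the sorted key set); same cost,
-- different algorithm. Both versions sort their arguments in place in Python; the
-- equivalence proved here is about the return value.


-- ===== PORT A =====
-- A's index-pair while loop, as structural recursion on the two remaining (sorted) suffixes;
-- the two trailing while loops are the base cases.
def pvMergeA : List Int → List Int → List Int
  | [], l2 => l2
  | a :: l1, [] => a :: l1
  | a :: l1, b :: l2 =>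
    if a = b then a :: pvMergeA l1 l2
    else if a < b then a :: pvMergeA l1 (b :: l2)
    else b :: pvMergeA (a :: l1) l2

def handle_or (index1 : List Int) (index2 : List Int) : List Int :=
  pvMergeA (PySem.List.sorted index1 (fun x => x) false)
           (PySem.List.sorted index2 (fun x => x) false)

-- ===== PORT B =====
def handle_or_alt (index1 : List Int) (index2 : List Int) : List Int :=
  let s1 := PySem.List.sorted index1 (fun x => x) false
  let s2 := PySem.List.sorted index2 (fun x => x) false
  let c1 := s1.foldl (fun d x => d.insert x (d.getD x 0 + 1)) (PySem.Dict.empty : PySem.Dict Int Int)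
  let c2 := s2.foldl (fun d x => d.insert x (d.getD x 0 + 1)) (PySem.Dict.empty : PySem.Dict Int Int)
  let ks := PySem.List.sorted (PySem.Set.union (PySem.Set.ofList s1) (PySem.Set.ofList s2))
              (fun x => x) false
  ks.foldl (fun acc x => acc ++ List.replicate (max (c1.getD x 0) (c2.getD x 0)).toNat x) []

-- ===== PRECONDITION & SPEC =====
def Spec_handle_or (index1 : List Int) (index2 : List Int) (out : List Int) : Prop := out = handle_or_alt index1 index2
instance (index1 : List Int) (index2 : List Int) (out : List Int) : Decidable (Spec_handle_or index1 index2 out) := by unfold Spec_handle_or; infer_instance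

-- ===== CLAIM (what is proved, stated in full; the proofs are below) =====
def Claim_equal_handle_or : Prop := ∀ (index1 : List Int) (index2 : List Int), Dom_handle_or index1 index2 → Spec_handle_or index1 index2 (handle_or index1 index2)

-- ===== LEMMAS AND PROOFS =====

-- every element of the merge comes from one of the two lists
theorem mem_pvMergeA (l1 l2 : List Int) (x : Int) (hx : x ∈ pvMergeA l1 l2) : x ∈ l1 ∨ x ∈ l2 := by
  induction l1, l2 using pvMergeA.induct with
  | case1 l2 => simp only [pvMergeA] at hx; exact Or.inr hx
  | case2 a l1 => simp only [pvMergeA] at hx; exact Or.inl hx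
  | case3 l1 b l2 ih =>
      simp only [pvMergeA] at hx
      rcases List.mem_cons.mp hx with h | h
      · exact Or.inl (by simp [h])
      · rcases ih h with h' | h'
        · exact Or.inl (List.mem_cons_of_mem _ h')
        · exact Or.inr (List.mem_cons_of_mem _ h')
  | case4 a l1 b l2 hab hlt ih =>
      rw [pvMergeA, if_neg hab, if_pos hlt] at hx
      rcases List.mem_cons.mp hx with h | h
      · exact Or.inl (by simp [h])
      · rcases ih h with h' | h'
        · exact Or.inl (List.mem_cons_of_mem _ h')
        · exact Or.inr h'
  | case5 a l1 b l2 hab hlt ih =>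
      rw [pvMergeA, if_neg hab, if_neg hlt] at hx
      rcases List.mem_cons.mp hx with h | h
      · exact Or.inr (by simp [h])
      · rcases ih h with h' | h'
        · exact Or.inl h'
        · exact Or.inr (List.mem_cons_of_mem _ h')

-- the merge of two sorted lists is sorted
theorem pairwise_pvMergeA (l1 l2 : List Int)
    (h1 : l1.Pairwise (· ≤ ·)) (h2 : l2.Pairwise (· ≤ ·)) :
    (pvMergeA l1 l2).Pairwise (· ≤ ·) := by
  induction l1, l2 using pvMergeA.induct with
  | case1 l2 => simpa only [pvMergeA] using h2
  | case2 a l1 => simpa only [pvMergeA] using h1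
  | case3 l1 b l2 ih =>
      simp only [pvMergeA]
      rw [List.pairwise_cons] at h1 h2
      refine List.pairwise_cons.mpr ⟨?_, ih h1.2 h2.2⟩
      intro y hy
      rcases mem_pvMergeA _ _ _ hy with h | h
      · exact h1.1 y h
      · exact h2.1 y h
  | case4 a l1 b l2 hab hlt ih =>
      rw [pvMergeA, if_neg hab, if_pos hlt]
      rw [List.pairwise_cons] at h1
      refine List.pairwise_cons.mpr ⟨?_, ih h1.2 h2⟩
      intro y hy
      rcases mem_pvMergeA _ _ _ hy with h | h
      · exact h1.1 y h
      · rcases List.mem_cons.mp h with h' | h'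
        · exact h' ▸ le_of_lt hlt
        · exact le_trans (le_of_lt hlt) ((List.pairwise_cons.mp h2).1 y h')
  | case5 a l1 b l2 hab hlt ih =>
      rw [pvMergeA, if_neg hab, if_neg hlt]
      rw [List.pairwise_cons] at h2
      have hba : b < a := lt_of_le_of_ne (not_lt.mp hlt) (Ne.symm hab)
      refine List.pairwise_cons.mpr ⟨?_, ih h1 h2.2⟩
      intro y hy
      rcases mem_pvMergeA _ _ _ hy with h | h
      · rcases List.mem_cons.mp h with h' | h'
        · exact h' ▸ le_of_lt hba
        · exact le_trans (le_of_lt hba) ((List.pairwise_cons.mp h1).1 y h')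
      · exact h2.1 y h

-- in a sorted list headed by b, nothing smaller than b occurs
theorem count_eq_zero_of_lt_head (b : Int) (l : List Int) (a : Int)
    (h : (b :: l).Pairwise (· ≤ ·)) (hab : a < b) : (b :: l).count a = 0 := by
  rw [List.count_eq_zero]
  intro hmem
  rcases List.mem_cons.mp hmem with h' | h'
  · omega
  · exact absurd ((List.pairwise_cons.mp h).1 a h') (by omega)

-- count characterisation of the merge: per-element max of the two counts
theorem count_pvMergeA (l1 l2 : List Int)
    (h1 : l1.Pairwise (· ≤ ·)) (h2 : l2.Pairwise (· ≤ ·)) (x : Int) :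
    (pvMergeA l1 l2).count x = max (l1.count x) (l2.count x) := by
  induction l1, l2 using pvMergeA.induct with
  | case1 l2 => simp [pvMergeA]
  | case2 a l1 => simp [pvMergeA]
  | case3 l1 b l2 ih =>
      rw [List.pairwise_cons] at h1 h2
      rw [pvMergeA, if_pos rfl, List.count_cons, List.count_cons, List.count_cons, ih h1.2 h2.2]
      by_cases hx : b = x
      · subst hx; rw [if_pos (by simp : (b == b) = true)]; omega
      · rw [if_neg (by simp [hx] : ¬ (b == x) = true)]; omega
  | case4 a l1 b l2 hab hlt ih =>
      have h1' := List.pairwise_cons.mp h1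
      have hz : (b :: l2).count a = 0 := count_eq_zero_of_lt_head b l2 a h2 hlt
      rw [pvMergeA, if_neg hab, if_pos hlt, List.count_cons, ih h1'.2 h2,
          List.count_cons (a := x) (b := a)]
      by_cases hx : a = x
      · subst hx; rw [if_pos (by simp : (a == a) = true)]; omega
      · rw [if_neg (by simp [hx] : ¬ (a == x) = true)]; omega
  | case5 a l1 b l2 hab hlt ih =>
      have hba : b < a := lt_of_le_of_ne (not_lt.mp hlt) (Ne.symm hab)
      have h2' := List.pairwise_cons.mp h2
      have hz : (a :: l1).count b = 0 := count_eq_zero_of_lt_head a l1 b h1 hba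
      rw [pvMergeA, if_neg hab, if_neg hlt, List.count_cons, ih h1 h2'.2,
          List.count_cons (a := x) (b := b)]
      by_cases hx : b = x
      · subst hx; rw [if_pos (by simp : (b == b) = true)]; omega
      · rw [if_neg (by simp [hx] : ¬ (b == x) = true)]; omega

-- count of the replicate-flatMap over a Nodup key list
theorem count_flatMap_replicate (ks : List Int) (hnd : ks.Nodup) (f : Int → Nat) (x : Int) :
    (ks.flatMap (fun k => List.replicate (f k) k)).count x = if x ∈ ks then f x else 0 := by
  induction ks with
  | nil => simp
  | cons k ks ih =>
      rw [List.nodup_cons] at hnd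
      rw [List.flatMap_cons, List.count_append, ih hnd.2, List.count_replicate]
      by_cases hk : x = k
      · subst hk
        simp [hnd.1]
      · simp [Ne.symm hk, hk]

-- the replicate-flatMap over a strictly increasing key list is sorted
theorem pairwise_flatMap_replicate (ks : List Int) (h : ks.Pairwise (· < ·)) (f : Int → Nat) :
    (ks.flatMap (fun k => List.replicate (f k) k)).Pairwise (· ≤ ·) := by
  induction ks with
  | nil => simp
  | cons k ks ih =>
      rw [List.pairwise_cons] at h
      rw [List.flatMap_cons]
      refine List.pairwise_append.mpr ⟨?_, ih h.2, ?_⟩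
      · exact List.pairwise_replicate.mpr (Or.inr le_rfl)
      · intro a ha b hb
        have hak : a = k := List.eq_of_mem_replicate ha
        rcases List.mem_flatMap.mp hb with ⟨kk, hkk, hb'⟩
        have hbk : b = kk := List.eq_of_mem_replicate hb'
        rw [hak, hbk]
        exact le_of_lt (h.1 kk hkk)

-- Nodup of a sorted list, from Nodup of the source
theorem nodup_sorted_of_nodup (xs : List Int) (h : xs.Nodup) :
    (PySem.List.sorted xs (fun x => x) false).Nodup :=
  (PySem.List.sorted_perm xs (fun x => x) false).nodup_iff.mpr h

-- sorted-Nodup lists are strictly increasing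
theorem pairwise_lt_of_pairwise_le_nodup (xs : List Int)
    (h : xs.Pairwise (· ≤ ·)) (hnd : xs.Nodup) : xs.Pairwise (· < ·) := by
  induction xs with
  | nil => simp
  | cons a l ih =>
      rw [List.pairwise_cons] at h ⊢
      rw [List.nodup_cons] at hnd
      refine ⟨fun b hb => lt_of_le_of_ne (h.1 b hb) ?_, ih h.2 hnd.2⟩
      intro hab
      exact hnd.1 (hab ▸ hb)

-- the core equality, for arbitrary inputs
theorem handle_or_eq_alt (index1 index2 : List Int) :
    handle_or index1 index2 = handle_or_alt index1 index2 := by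
  have h1 : (PySem.List.sorted index1 (fun x => x) false).Pairwise (· ≤ ·) :=
    PySem.List.sorted_pairwise index1 (fun x => x)
  have h2 : (PySem.List.sorted index2 (fun x => x) false).Pairwise (· ≤ ·) :=
    PySem.List.sorted_pairwise index2 (fun x => x)
  set s1 := PySem.List.sorted index1 (fun x => x) false with hs1
  set s2 := PySem.List.sorted index2 (fun x => x) false with hs2
  have hrw : handle_or_alt index1 index2 =
      (PySem.List.sorted (PySem.Set.union (PySem.Set.ofList s1) (PySem.Set.ofList s2))
          (fun x => x) false).flatMap
        (fun x => List.replicate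
          (max ((PySem.Dict.counter s1).getD x 0) ((PySem.Dict.counter s2).getD x 0)).toNat x) := by
    simp only [handle_or_alt, PySem.Dict.foldl_insert_getD_add_one_eq_counter,
               PySem.List.foldl_append_eq_flatMap, List.nil_append, ← hs1, ← hs2]
  rw [show handle_or index1 index2 = pvMergeA s1 s2 from rfl, hrw]
  set u := PySem.Set.union (PySem.Set.ofList s1) (PySem.Set.ofList s2) with hu
  set ks := PySem.List.sorted u (fun x => x) false with hks
  have hund : u.Nodup := PySem.Set.nodup_union _ _ (PySem.Set.nodup_ofList s1)
  have hknd : ks.Nodup := nodup_sorted_of_nodup u hund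
  have hklt : ks.Pairwise (· < ·) :=
    pairwise_lt_of_pairwise_le_nodup ks (PySem.List.sorted_pairwise u (fun x => x)) hknd
  have hmem : ∀ x : Int, x ∈ ks ↔ x ∈ s1 ∨ x ∈ s2 := by
    intro x
    rw [hks, PySem.List.mem_sorted, hu, PySem.Set.mem_union, PySem.Set.mem_ofList,
        PySem.Set.mem_ofList]
  refine List.Perm.eq_of_pairwise (fun a b _ _ hab hba => le_antisymm hab hba)
    (pairwise_pvMergeA s1 s2 h1 h2)
    (pairwise_flatMap_replicate ks hklt _) ?_
  rw [List.perm_iff_count]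
  intro x
  rw [count_pvMergeA s1 s2 h1 h2 x, count_flatMap_replicate ks hknd _ x]
  by_cases hx : x ∈ ks
  · rw [if_pos hx, PySem.Dict.getD_counter, PySem.Dict.getD_counter]
    omega
  · rw [if_neg hx]
    have hx1 : x ∉ s1 := fun h => hx ((hmem x).mpr (Or.inl h))
    have hx2 : x ∉ s2 := fun h => hx ((hmem x).mpr (Or.inr h))
    rw [List.count_eq_zero_of_not_mem hx1, List.count_eq_zero_of_not_mem hx2]
    omega

-- ===== VERDICT (by name: the statement is the Claim_ definition above) =====
theorem handle_or_spec : Claim_equal_handle_or := by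
  intro index1 index2 _
  unfold Spec_handle_or
  exact handle_or_eq_alt index1 index2
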